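-- pv_equiv track=rewrite | github.com/Borissapo/WGCReserves | gold_tracker/scrapers/uzbekistan_cbu.py | _sample_urls
-- ===== SOURCE A (Python) =====
-- def _sample_urls(detail_urls: list[str]) -> list[str]:
--     """Pick a spread of detail-page URLs to cover all years.
--
--     Releases are ~monthly, so every 12th URL roughly covers a new
--     annual XLSX.  We always include the latest (index 0).
--     """
--     if not detail_urls:
--         return []
--
--     sampled: list[str] = [detail_urls[0]]
--     for i in range(12, len(detail_urls), 12):
--         if detail_urls[i] not in sampled:
--             sampled.append(detail_urls[i])
--
--     # Also include the very last (oldest) to catch the earliest file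
--     if detail_urls[-1] not in sampled:
--         sampled.append(detail_urls[-1])
--
--     return sampled
-- ===== SOURCE B (Python) =====
-- def _sample_urls(detail_urls: list[str]) -> list[str]:
--     if not detail_urls:
--         return []
--     # one iterator pass: keep an element, then skip the next 11
--     picks = []
--     it = iter(detail_urls)
--     for u in it:
--         picks.append(u)
--         for _ in range(11):
--             next(it, None)
--     picks.append(detail_urls[-1])
--     # single dedup pass preserving first occurrence
--     return list(dict.fromkeys(picks))
-- ===== Notes on version B (the rewrite author's own statement) =====
-- stated objective: faster
-- what changed: B makes one iterator pass over the list (keep an element, skip the next 11; no index arithmetic or range loop), appends the last element, and deduplicates in one final dict.fromkeys pass instead of A's interleaved per-element list-membership branches.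
import Mathlib
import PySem

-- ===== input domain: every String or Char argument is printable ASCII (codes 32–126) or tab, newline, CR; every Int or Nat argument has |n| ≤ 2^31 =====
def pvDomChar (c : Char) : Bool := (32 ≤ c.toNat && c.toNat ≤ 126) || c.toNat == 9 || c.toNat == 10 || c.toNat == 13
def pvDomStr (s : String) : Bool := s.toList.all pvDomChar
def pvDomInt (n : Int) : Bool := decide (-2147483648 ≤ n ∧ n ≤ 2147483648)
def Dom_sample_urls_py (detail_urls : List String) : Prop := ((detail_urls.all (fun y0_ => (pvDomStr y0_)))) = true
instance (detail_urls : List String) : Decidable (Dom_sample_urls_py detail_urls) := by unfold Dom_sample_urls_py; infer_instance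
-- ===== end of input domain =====

-- B replaces A's index loop (range(12, n, 12) with interleaved membership branches) by a
-- single iterator pass that keeps one element and skips the next 11, then appends the
-- last element and deduplicates once at the end.

-- ===== PORT A =====
-- Port of A: accumulator list with per-element membership checks, then the last-element patch-up.
def sample_urls_py (detail_urls : List String) : List String :=
  if detail_urls = [] then []
  else
    let sampled : List String :=
      (PySem.List.pyRange 12 (detail_urls.length : Int) 12).foldl
        (fun sampled i =>
          let u := PySem.List.pyGetD detail_urls i ""
          if u ∈ sampled then sampled else sampled ++ [u])
        [PySem.List.pyGetD detail_urls 0 ""]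
    let last := PySem.List.pyGetD detail_urls (-1) ""
    if last ∈ sampled then sampled else sampled ++ [last]

-- ===== PORT B =====
-- Port of B's iterator pass: keep the head, skip the next 11 elements, continue.
def pvChunkFirsts : List String → List String
  | [] => []
  | x :: t => x :: pvChunkFirsts (t.drop 11)
  termination_by l => l.length
  decreasing_by
    simp

-- Port of B: iterator walk, append detail_urls[-1], one dedup pass (dict.fromkeys).
def sample_urls_py_alt (detail_urls : List String) : List String :=
  if detail_urls = [] then []
  else
    let picks := pvChunkFirsts detail_urls ++ [PySem.List.pyGetD detail_urls (-1) ""]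
    PySem.List.dedup picks

-- ===== PRECONDITION & SPEC =====
def Spec_sample_urls_py (detail_urls : List String) (out : List String) : Prop := out = sample_urls_py_alt detail_urls
instance (detail_urls : List String) (out : List String) : Decidable (Spec_sample_urls_py detail_urls out) := by unfold Spec_sample_urls_py; infer_instance

-- ===== CLAIM (what is proved, stated in full; the proofs are below) =====
def Claim_equal_sample_urls_py : Prop := ∀ (detail_urls : List String), Dom_sample_urls_py detail_urls → Spec_sample_urls_py detail_urls (sample_urls_py detail_urls)

-- ===== LEMMAS AND PROOFS =====

-- A's membership-guarded append loop is a Set.add fold over the mapped index list.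
theorem fold_eq (l : List String) (init : List String) (idxs : List Int) :
    idxs.foldl (fun sampled i =>
        let u := PySem.List.pyGetD l i ""
        if u ∈ sampled then sampled else sampled ++ [u]) init
      = (idxs.map (fun i => PySem.List.pyGetD l i "")).foldl PySem.Set.add init := by
  rw [List.foldl_map]
  congr 1
  funext acc x
  simp [PySem.Set.add, PySem.Set.contains]

-- one unfolding step of the walk: skipping 11 after the head is dropping 12 from the list
theorem chunk_cons (x : String) (t : List String) :
    pvChunkFirsts (x :: t) = x :: pvChunkFirsts ((x :: t).drop 12) := by
  rw [pvChunkFirsts.eq_def]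
  rw [show (12 : Nat) = 11 + 1 from rfl, List.drop_succ_cons]

theorem getD_drop (l : List String) (m n : Nat) (d : String) :
    (l.drop m).getD n d = l.getD (m + n) d := by
  simp [List.getD_eq_getElem?_getD, List.getElem?_drop]

-- The chunked walk collects exactly the elements at indices 0, 12, 24, ….
theorem chunk_firsts_eq : ∀ (n : Nat) (l : List String), l.length = n →
    pvChunkFirsts l = (List.range ((l.length + 11) / 12)).map (fun k => l.getD (12 * k) "") := by
  intro n
  induction n using Nat.strong_induction_on with
  | _ n ih =>
    intro l hl
    match l with
    | [] =>
      rw [pvChunkFirsts.eq_def]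
      simp
    | x :: t =>
      have hl' : t.length + 1 = n := by simpa using hl
      rw [chunk_cons]
      rw [ih (((x :: t).drop 12).length) (by simp; omega) _ rfl]
      have hc : ((x :: t).length + 11) / 12 = ((((x :: t).drop 12).length + 11) / 12) + 1 := by
        simp; omega
      rw [hc, List.range_succ_eq_map]
      simp only [List.map_cons, List.map_map]
      congr 1
      apply List.map_congr_left
      intro k _
      show ((x :: t).drop 12).getD (12 * k) "" = (x :: t).getD (12 * Nat.succ k) ""
      rw [getD_drop]
      congr 1
      omega

-- A's range(12, n, 12) mapped through indexing is the tail of the chunk-heads list.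
theorem pyRange12_map (l : List String) :
    (PySem.List.pyRange 12 (l.length : Int) 12).map (fun i => PySem.List.pyGetD l i "")
      = (List.range ((l.length + 11) / 12 - 1)).map (fun k => l.getD (12 * (k + 1)) "") := by
  rw [PySem.List.pyRange_of_pos 12 _ (by norm_num)]
  rw [List.map_map]
  have hcnt : (if (12:Int) < (l.length : Int) then (((l.length : Int) - 12 + 12 - 1) / 12).toNat else 0)
      = (l.length + 11) / 12 - 1 := by
    split_ifs with h
    · omega
    · omega
  rw [hcnt]
  apply List.map_congr_left
  intro k _
  show PySem.List.pyGetD l (12 + 12 * (k : Int)) "" = l.getD (12 * (k + 1)) ""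
  have : (12 + 12 * (k : Int)) = ((12 * (k + 1) : Nat) : Int) := by push_cast; ring
  rw [this, PySem.List.pyGetD_natCast]

-- ===== VERDICT (by name: the statement is the Claim_ definition above) =====
theorem sample_urls_py_spec : Claim_equal_sample_urls_py := by
  intro l _
  unfold Spec_sample_urls_py sample_urls_py sample_urls_py_alt
  by_cases h : l = []
  · simp [h]
  · simp only [h, if_false]
    rw [PySem.List.dedup_eq_ofList, PySem.Set.ofList_eq_foldl]
    rw [chunk_firsts_eq l.length l rfl]
    have hn : 1 ≤ l.length := List.length_pos_iff.mpr h
    have hc : (l.length + 11) / 12 = ((l.length + 11) / 12 - 1) + 1 := by omega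
    rw [hc, List.range_succ_eq_map]
    simp only [List.map_cons, List.map_map, List.foldl_append, List.foldl_cons]
    rw [fold_eq, pyRange12_map]
    have hadd : PySem.Set.add ([] : List String) (l.getD (12 * 0) "") = [l.getD 0 ""] := by
      simp [PySem.Set.add, PySem.Set.contains]
    rw [hadd]
    have h0 : PySem.List.pyGetD l 0 "" = l.getD 0 "" := PySem.List.pyGetD_zero l ""
    rw [h0]
    have hmap : (List.range ((l.length + 11) / 12 - 1)).map
          ((fun k => l.getD (12 * k) "") ∘ Nat.succ)
        = (List.range ((l.length + 11) / 12 - 1)).map (fun k => l.getD (12 * (k + 1)) "") := by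
      apply List.map_congr_left
      intro k _
      rfl
    rw [hmap]
    simp [PySem.Set.add, PySem.Set.contains]
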